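-- pv_equiv track=rewrite | github.com/jamester234/Advent-of-Code-2016 | Days/Day 2 - Bathroom Security/Part 2.py | left
-- ===== SOURCE A (Python) =====
-- def left(string):
--     if string in [i for i in '346789']:
--         return(str(int(string) - 1))
--     elif string == 'B':
--         return('A')
--     elif string == 'C':
--         return('B')
--     else:
--         return('NotAllowed')
-- ===== SOURCE B (Python) =====
-- # The keypad of AoC 2016 Day 2 part 2; "left" of a key is its left neighbour in its row.
-- KEYPAD = ("1", "234", "56789", "ABC", "D")
--
-- def left(string):
--     for row in KEYPAD:
--         for prev, cur in zip(row, row[1:]):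
--             if cur == string:
--                 return prev
--     return 'NotAllowed'
-- ===== Notes on version B (the rewrite author's own statement) =====
-- stated objective: alternative
-- what changed: Instead of a fixed per-key answer (digit arithmetic plus an if/elif chain), B reconstructs the answer from the keypad geometry: it scans the keypad rows and returns the character immediately to the left of the matched key, falling back to the same default sentinel.
import Mathlib
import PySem

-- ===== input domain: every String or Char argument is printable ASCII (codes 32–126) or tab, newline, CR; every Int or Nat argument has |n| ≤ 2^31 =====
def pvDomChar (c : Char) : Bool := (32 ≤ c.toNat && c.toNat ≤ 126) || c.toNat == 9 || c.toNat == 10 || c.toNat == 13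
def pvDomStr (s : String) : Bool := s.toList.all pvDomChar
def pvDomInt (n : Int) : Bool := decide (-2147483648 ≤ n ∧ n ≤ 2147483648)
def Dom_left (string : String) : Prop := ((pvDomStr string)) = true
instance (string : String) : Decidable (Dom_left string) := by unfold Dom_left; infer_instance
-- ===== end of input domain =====

-- B derives the answer from the keypad geometry (left neighbour in the matched row) instead of A's arithmetic + branch chain; objective: alternative.
-- ===== PORT A =====
def left (string : String) : String :=
  if ("346789".toList.map (fun i => String.mk [i])).contains string then
    -- int(string) cannot raise inside this branch, so getD 0 is never used
    PySem.Int.toStr ((PySem.Int.ofStr? string).getD 0 - 1)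
  else if string == "B" then "A"
  else if string == "C" then "B"
  else "NotAllowed"

-- ===== PORT B =====
def leftKeypad : List String := ["1", "234", "56789", "ABC", "D"]

-- inner loop: 'for prev, cur in zip(row, row[1:]): if cur == string: return prev'
def leftScanRow (pairs : List (Char × Char)) (string : String) : Option String :=
  match pairs with
  | [] => none
  | (prev, cur) :: rest =>
      if String.mk [cur] == string then some (String.mk [prev]) else leftScanRow rest string

-- outer loop over keypad rows
def leftScanRows (rows : List String) (string : String) : Option String :=
  match rows with
  | [] => none
  | row :: rest =>
      match leftScanRow (row.toList.zip row.toList.tail) string with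
      | some r => some r
      | none => leftScanRows rest string

def left_alt (string : String) : String :=
  (leftScanRows leftKeypad string).getD "NotAllowed"

-- ===== PRECONDITION & SPEC =====
def Spec_left (string : String) (out : String) : Prop := out = left_alt string
instance (string : String) (out : String) : Decidable (Spec_left string out) := by unfold Spec_left; infer_instance

-- ===== CLAIM =====
def Claim_equal_left : Prop := ∀ (string : String), Dom_left string → Spec_left string (left string)

-- ===== LEMMAS AND PROOFS =====

-- ===== VERDICT =====
theorem left_spec : Claim_equal_left := by
  intro s _
  unfold Spec_left left left_alt leftKeypad leftScanRows
  by_cases h3 : s = "3"; · subst h3; decide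
  by_cases h4 : s = "4"; · subst h4; decide
  by_cases h6 : s = "6"; · subst h6; decide
  by_cases h7 : s = "7"; · subst h7; decide
  by_cases h8 : s = "8"; · subst h8; decide
  by_cases h9 : s = "9"; · subst h9; decide
  by_cases hB : s = "B"; · subst hB; decide
  by_cases hC : s = "C"; · subst hC; decide
  have h3' : ¬ s = String.mk ['3'] := h3
  have h4' : ¬ s = String.mk ['4'] := h4
  have h6' : ¬ s = String.mk ['6'] := h6
  have h7' : ¬ s = String.mk ['7'] := h7
  have h8' : ¬ s = String.mk ['8'] := h8
  have h9' : ¬ s = String.mk ['9'] := h9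
  have hB' : ¬ s = String.mk ['B'] := hB
  have hC' : ¬ s = String.mk ['C'] := hC
  have e3 : ¬ String.mk ['3'] = s := fun h => h3' h.symm
  have e4 : ¬ String.mk ['4'] = s := fun h => h4' h.symm
  have e6 : ¬ String.mk ['6'] = s := fun h => h6' h.symm
  have e7 : ¬ String.mk ['7'] = s := fun h => h7' h.symm
  have e8 : ¬ String.mk ['8'] = s := fun h => h8' h.symm
  have e9 : ¬ String.mk ['9'] = s := fun h => h9' h.symm
  have eB : ¬ String.mk ['B'] = s := fun h => hB' h.symm
  have eC : ¬ String.mk ['C'] = s := fun h => hC' h.symm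
  simp [leftScanRows, leftScanRow, h3', h4', h6', h7', h8', h9', hB', hC',
    e3, e4, e6, e7, e8, e9, eB, eC, hB, hC]
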